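-- pv_equiv track=rewrite | github.com/hortiCulturist/my_homework | 19/19.5.py | can_make_pal
-- ===== SOURCE A (Python) =====
-- def can_make_pal(stri):
--     d = {}
--     for i in stri:
--         if d.get(i) is None:
--             d[i] = 1
--         else:
--             d[i] += 1
--     n = len(d)
--     e = 0
--     for j in d.values():
--         if j % 2 == 0:
--             e += 1
--     return e == n or e == n-1
-- ===== SOURCE B (Python) =====
-- def can_make_pal(stri):
--     odd = set()
--     for ch in stri:
--         if ch in odd:
--             odd.remove(ch)
--         else:
--             odd.add(ch)
--     return len(odd) <= 1
-- ===== Notes on version B (the rewrite author's own statement) =====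
-- stated objective: idiomatic
-- what changed: Replaces A's build-count-dict-then-scan-values (two passes, a dict of counts) with the standard single-pass odd-parity set toggle: each char is added to / removed from a set, and the answer is len(odd) <= 1.
import Mathlib
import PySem

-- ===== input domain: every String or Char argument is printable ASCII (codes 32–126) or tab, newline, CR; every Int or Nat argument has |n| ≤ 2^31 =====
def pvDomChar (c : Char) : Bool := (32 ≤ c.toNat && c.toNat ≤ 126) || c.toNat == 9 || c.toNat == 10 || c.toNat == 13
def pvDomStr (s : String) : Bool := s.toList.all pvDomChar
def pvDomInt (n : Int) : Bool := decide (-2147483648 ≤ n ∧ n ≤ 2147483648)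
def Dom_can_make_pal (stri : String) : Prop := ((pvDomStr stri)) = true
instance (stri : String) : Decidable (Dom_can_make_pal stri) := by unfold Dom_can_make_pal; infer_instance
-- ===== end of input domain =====

-- B replaces A's count-dict + second pass over the values by the single-pass
-- odd-parity set toggle (idiomatic; same asymptotic cost).

-- ===== PORT A =====
def can_make_pal (stri : String) : Bool :=
  let d : PySem.Dict Char Int := stri.toList.foldl (fun d c =>
    match d.get? c with
    | none => d.insert c 1
    | some v => d.insert c (v + 1)) PySem.Dict.empty
  let n : Int := d.size
  let e : Int := d.values.foldl (fun e j =>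
    if PySem.Int.mod j 2 == 0 then e + 1 else e) 0
  e == n || e == n - 1

-- ===== PORT B =====
-- 'odd.remove(ch)' runs only under 'ch in odd', so Set.discard is exact here.
def can_make_pal_alt (stri : String) : Bool :=
  let odd : PySem.Set Char := stri.toList.foldl (fun s c =>
    if PySem.Set.contains s c then PySem.Set.discard s c else PySem.Set.add s c)
    PySem.Set.empty
  decide (odd.length ≤ 1)

-- ===== PRECONDITION & SPEC =====
def Spec_can_make_pal (stri : String) (out : Bool) : Prop := out = can_make_pal_alt stri
instance (stri : String) (out : Bool) : Decidable (Spec_can_make_pal stri out) := by unfold Spec_can_make_pal; infer_instance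

-- ===== CLAIM (what is proved, stated in full; the proofs are below) =====
def Claim_equal_can_make_pal : Prop := ∀ (stri : String), Dom_can_make_pal stri → Spec_can_make_pal stri (can_make_pal stri)

-- ===== LEMMAS AND PROOFS =====

-- A's dict-building step is the counter step.
theorem pal_dict_eq_counter (l : List Char) :
    l.foldl (fun d c =>
      match d.get? c with
      | none => d.insert c (1 : Int)
      | some v => d.insert c (v + 1)) PySem.Dict.empty = PySem.Dict.counter l := by
  rw [← PySem.Dict.foldl_insert_getD_add_one_eq_counter]
  apply PySem.List.foldl_congr_mem
  intro d c _
  cases h : d.get? c <;>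
    simp [PySem.Dict.getD_eq_get?_getD, h]

-- B's toggle loop: nodup is preserved and membership is the parity of the count.
theorem pal_toggle_invariant (l : List Char) (s : PySem.Set Char) (hs : s.Nodup) :
    (l.foldl (fun s c =>
      if PySem.Set.contains s c then PySem.Set.discard s c else PySem.Set.add s c) s).Nodup ∧
    ∀ c, c ∈ l.foldl (fun s c =>
      if PySem.Set.contains s c then PySem.Set.discard s c else PySem.Set.add s c) s ↔
      ((c ∈ s) ↔ l.count c % 2 = 0) := by
  induction l generalizing s with
  | nil => simp [hs]
  | cons a t ih =>
    simp only [List.foldl_cons]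
    by_cases ha : a ∈ s
    · have hstep : (if PySem.Set.contains s a then PySem.Set.discard s a else PySem.Set.add s a)
          = PySem.Set.discard s a := by simp [ha]
      rw [hstep]
      obtain ⟨hn, hm⟩ := ih (PySem.Set.discard s a) (PySem.Set.nodup_discard s a hs)
      refine ⟨hn, fun c => ?_⟩
      rw [hm c, PySem.Set.mem_discard]
      by_cases hc : c = a
      · subst hc
        simp [ha]
        omega
      · simp [hc, Ne.symm hc]
    · have hstep : (if PySem.Set.contains s a then PySem.Set.discard s a else PySem.Set.add s a)
          = PySem.Set.add s a := by simp [ha]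
      rw [hstep]
      obtain ⟨hn, hm⟩ := ih (PySem.Set.add s a) (PySem.Set.nodup_add s a hs)
      refine ⟨hn, fun c => ?_⟩
      rw [hm c, PySem.Set.mem_add]
      by_cases hc : c = a
      · subst hc
        simp [ha]
        omega
      · simp [hc, Ne.symm hc]

theorem pal_countP_split (S : List Char) (p : Char → Bool) :
    S.countP p + S.countP (fun c => !p c) = S.length := by
  induction S with
  | nil => simp
  | cons a t ih => cases h : p a <;> simp [h] <;> omega


theorem pal_eq (l : List Char) :
    (let d : PySem.Dict Char Int := l.foldl (fun d c =>
        match d.get? c with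
        | none => d.insert c 1
        | some v => d.insert c (v + 1)) PySem.Dict.empty
     let n : Int := d.size
     let e : Int := d.values.foldl (fun e j =>
        if PySem.Int.mod j 2 == 0 then e + 1 else e) 0
     (e == n || e == n - 1))
    = decide ((l.foldl (fun s c =>
        if PySem.Set.contains s c then PySem.Set.discard s c else PySem.Set.add s c)
        PySem.Set.empty).length ≤ 1) := by
  simp only [pal_dict_eq_counter, PySem.List.foldl_if_add_one,
    PySem.Dict.values, PySem.Dict.size, PySem.Dict.items_counter, List.map_map,
    List.length_map, List.countP_map, zero_add]
  set S := PySem.Set.ofList l with hSdef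
  have hpred : ((fun x => PySem.Int.mod x 2 == 0) ∘ (fun x : Char × Int => x.2) ∘
      fun k => ((k, (List.count k l : Int)) : Char × Int))
      = fun c => !decide (List.count c l % 2 = 1) := by
    funext c
    simp only [Function.comp]
    rw [PySem.Int.mod_eq_emod_of_pos (b := 2) (by norm_num)]
    have hc : ((List.count c l : Int)) % 2 = ((List.count c l % 2 : Nat) : Int) := by omega
    rw [hc]
    rcases Nat.mod_two_eq_zero_or_one (List.count c l) with h | h <;> simp [h]
  rw [hpred]
  have hnodd := pal_toggle_invariant l PySem.Set.empty (by simp [PySem.Set.empty])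
  obtain ⟨hn, hm⟩ := hnodd
  have hO : (l.foldl (fun s c =>
      if PySem.Set.contains s c then PySem.Set.discard s c else PySem.Set.add s c)
      PySem.Set.empty).length = S.countP (fun c => decide (List.count c l % 2 = 1)) := by
    rw [List.countP_eq_length_filter]
    refine (List.perm_ext_iff_of_nodup hn ((PySem.Set.nodup_ofList l).filter _) |>.mpr ?_).length_eq
    intro c
    rw [hm c]
    simp only [List.mem_filter, PySem.Set.mem_ofList, PySem.Set.empty, List.not_mem_nil,
      false_iff, decide_eq_true_eq]
    constructor
    · intro h
      have h1 : List.count c l % 2 = 1 := by omega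
      exact ⟨List.count_pos_iff.mp (by omega), h1⟩
    · intro ⟨_, h1⟩; omega
  rw [hO]
  have hsplit := pal_countP_split S (fun c => decide (List.count c l % 2 = 1))
  set O := S.countP (fun c => decide (List.count c l % 2 = 1))
  set E := S.countP (fun c => !decide (List.count c l % 2 = 1))
  cases h1 : ((E:Int) == (S.length:Int)) <;> cases h2 : ((E:Int) == (S.length:Int) - 1) <;>
    simp_all <;> omega

-- ===== VERDICT (by name: the statement is the Claim_ definition above) =====
theorem can_make_pal_spec : Claim_equal_can_make_pal := by
  intro stri _
  unfold Spec_can_make_pal can_make_pal can_make_pal_alt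
  exact pal_eq stri.toList
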